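-- pv_equiv track=rewrite | github.com/facebookresearch/libri-light | data_preparation/metadata_completion/DuplicateSearch.py | getPossibleMatches
-- ===== SOURCE A (Python) =====
-- def getPossibleMatches(allGroups):
--
--     output = []
--     for group in allGroups:
--         group.sort(key=lambda x: x[0])
--         groupSize = len(group)
--         indexStart = 0
--         while indexStart < groupSize - 1:
--             currMatch = []
--             currTitle, currTags, currMetdataName = group[indexStart]
--             for indexEnd in range(indexStart + 1, groupSize):
--                 nextTitle, nextTags, nextMetadataName = group[indexEnd]
--                 isSame = True
--                 if currTitle == nextTitle:
--                     for tag in currTags: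
--                         if tag in ["version", "abridged", "dramatic reading"]:
--                             continue
--                         if nextTags.get(tag, None) != currTags[tag]:
--                             isSame = False
--                             break
--                     if isSame:
--                         currMatch.append(nextMetadataName)
--                 else:
--                     break
--             indexStart = indexEnd
--             if len(currMatch) > 0:
--                 currMatch.append(currMetdataName)
--                 output.append(currMatch)
--     return output
-- ===== SOURCE B (Python) =====
-- def getPossibleMatches(allGroups):
--     output = []
--     for group in allGroups:
--         group.sort(key=lambda x: x[0])
--         byTitle = {}
--         for title, tags, name in group:
--             byTitle.setdefault(title, []).append((tags, name))
--         for entries in byTitle.values():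
--             if len(entries) < 2:
--                 continue
--             currTags, currName = entries[0]
--             matches = [name for tags, name in entries[1:]
--                        if all(tags.get(t) == currTags[t] for t in currTags
--                               if t not in ("version", "abridged", "dramatic reading"))]
--             if matches:
--                 output.append(matches + [currName])
--     return output
-- ===== Notes on version B (the rewrite author's own statement) =====
-- stated objective: alternative
-- what changed: A's index-juggling while/for scan for consecutive same-title runs over the sorted group is replaced by a dictionary index built in one pass (title -> entries), whose values are then processed directly; the in-place sort is kept so mutation and ordering match.
import Mathlib
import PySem

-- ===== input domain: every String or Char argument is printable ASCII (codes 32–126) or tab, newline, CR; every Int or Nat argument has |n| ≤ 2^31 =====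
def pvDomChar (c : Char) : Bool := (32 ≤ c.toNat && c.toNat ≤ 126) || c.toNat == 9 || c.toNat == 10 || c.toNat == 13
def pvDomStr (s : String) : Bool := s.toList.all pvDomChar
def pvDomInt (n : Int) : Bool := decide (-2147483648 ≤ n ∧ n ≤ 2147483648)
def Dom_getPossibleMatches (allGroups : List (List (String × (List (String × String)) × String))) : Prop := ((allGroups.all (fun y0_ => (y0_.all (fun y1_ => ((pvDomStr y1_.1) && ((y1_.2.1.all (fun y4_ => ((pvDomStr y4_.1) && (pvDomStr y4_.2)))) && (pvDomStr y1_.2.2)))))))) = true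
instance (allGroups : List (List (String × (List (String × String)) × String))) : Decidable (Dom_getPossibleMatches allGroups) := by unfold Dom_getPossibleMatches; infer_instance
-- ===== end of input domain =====

-- B replaces A's index-juggling while/for scan for consecutive same-title runs by a one-pass
-- dictionary index (title -> entries) whose values are then processed directly (objective:
-- alternative algorithm, same asymptotic cost). Both versions sort each group in place (an
-- observable mutation); the equivalence proved here is about the return value only.

-- ===== PORT A =====
-- the inner 'for tag in currTags' with its break; Python's currTags[tag] cannot raise here (tag is a key of currTags)
def pvCheckTagsA (currTags nextTags : List (String × String)) : List (String × String) → Bool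
  | [] => true
  | (tag, _) :: rest =>
    if tag = "version" ∨ tag = "abridged" ∨ tag = "dramatic reading" then
      pvCheckTagsA currTags nextTags rest
    else if (PySem.Dict.mk nextTags).get? tag ≠ (PySem.Dict.mk currTags).get? tag then
      false
    else
      pvCheckTagsA currTags nextTags rest

-- 'for indexEnd in range(indexStart+1, groupSize)': returns (currMatch, indexEnd after the loop) —
-- the break index, or groupSize-1 when the range is exhausted; g.getD j is exact (j < g.length at every read)
def pvInnerA (g : List (String × (List (String × String)) × String)) (currTitle : String)
    (currTags : List (String × String)) (n : Nat) (fuel j : Nat) (acc : List String) : List String × Nat :=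
  match fuel with
  | 0 => (acc, n - 1)
  | fuel + 1 =>
    if j < n then
      let e := g.getD j ("", [], "")
      if e.1 = currTitle then
        if pvCheckTagsA currTags e.2.1 currTags then
          pvInnerA g currTitle currTags n fuel (j + 1) (acc ++ [e.2.2])
        else
          pvInnerA g currTitle currTags n fuel (j + 1) acc
      else
        (acc, j)
    else
      (acc, n - 1)

-- the 'while indexStart < groupSize - 1' loop over one sorted group
def pvLoopA (g : List (String × (List (String × String)) × String)) (n : Nat) (fuel i : Nat)
    (output : List (List String)) : List (List String) :=
  match fuel with
  | 0 => output
  | fuel + 1 =>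
    if i < n - 1 then
      let e := g.getD i ("", [], "")
      let r := pvInnerA g e.1 e.2.1 n (n - (i + 1)) (i + 1) []
      pvLoopA g n fuel r.2 (if r.1.length > 0 then output ++ [r.1 ++ [e.2.2]] else output)
    else
      output

-- group.sort(key=lambda x: x[0]); the key is the string's character list so the comparison is
-- kernel-computable — lexicographic by code point, exactly Python's string order
def getPossibleMatches (allGroups : List (List (String × (List (String × String)) × String))) : List (List String) :=
  allGroups.foldl
    (fun output group =>
      let g := PySem.List.sorted group (fun x => x.1.toList) false
      pvLoopA g g.length g.length 0 output)
    []

-- ===== PORT B =====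
-- the all(...) generator in B's comprehension
def pvTagsMatchB (currTags nextTags : List (String × String)) : Bool :=
  currTags.all (fun p =>
    if p.1 = "version" ∨ p.1 = "abridged" ∨ p.1 = "dramatic reading" then true
    else (PySem.Dict.mk nextTags).get? p.1 == (PySem.Dict.mk currTags).get? p.1)

-- the body of B's loop over byTitle.values()
def pvStepB' (output : List (List String)) (entries : List ((List (String × String)) × String)) :
    List (List String) :=
  if entries.length < 2 then output
  else
    match entries with
    | [] => output
    | c :: rest =>
      let ms := rest.filterMap (fun e => if pvTagsMatchB c.1 e.1 then some e.2 else none)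
      if ms ≠ [] then output ++ [ms ++ [c.2]] else output

-- byTitle.setdefault(title, []).append((tags, name)) over the sorted group, then byTitle.values()
def getPossibleMatches_alt (allGroups : List (List (String × (List (String × String)) × String))) : List (List String) :=
  allGroups.foldl
    (fun output group =>
      let g := PySem.List.sorted group (fun x => x.1.toList) false
      let byTitle := g.foldl
        (fun d e => PySem.Dict.modify d e.1 [] (· ++ [(e.2.1, e.2.2)])) PySem.Dict.empty
      byTitle.values.foldl pvStepB' output)
    []

-- ===== PRECONDITION & SPEC =====
def Spec_getPossibleMatches (allGroups : List (List (String × (List (String × String)) × String))) (out : List (List String)) : Prop := out = getPossibleMatches_alt allGroups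
instance (allGroups : List (List (String × (List (String × String)) × String))) (out : List (List String)) : Decidable (Spec_getPossibleMatches allGroups out) := by unfold Spec_getPossibleMatches; infer_instance

-- ===== CLAIM (what is proved, stated in full; the proofs are below) =====
def Claim_equal_getPossibleMatches : Prop := ∀ (allGroups : List (List (String × (List (String × String)) × String))), Dom_getPossibleMatches allGroups → Spec_getPossibleMatches allGroups (getPossibleMatches allGroups)

-- ===== LEMMAS AND PROOFS =====

-- proof-side middle form: maximal consecutive same-title runs of a list
def pvBlocksGo (out : List (List (String × (List (String × String)) × String)))
    (block : List (String × (List (String × String)) × String)) :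
    List (String × (List (String × String)) × String) → List (List (String × (List (String × String)) × String))
  | [] => if block = [] then out else out ++ [block]
  | e :: rest =>
    if block ≠ [] ∧ e.1 ≠ (block.headD ("", [], "")).1 then
      pvBlocksGo (out ++ [block]) [e] rest
    else
      pvBlocksGo out (block ++ [e]) rest

def pvBlocks (group : List (String × (List (String × String)) × String)) :
    List (List (String × (List (String × String)) × String)) :=
  pvBlocksGo [] [] group

-- proof-side: pvStepB' lifted to full triples
def pvStepB (output : List (List String)) (block : List (String × (List (String × String)) × String)) :
    List (List String) :=
  if block.length < 2 then output
  else
    match block with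
    | [] => output
    | c :: rest =>
      let ms := rest.filterMap (fun e => if pvTagsMatchB c.2.1 e.2.1 then some e.2.2 else none)
      if ms ≠ [] then output ++ [ms ++ [c.2.2]] else output

theorem pvCheck_eq_match (c nxt : List (String × String)) :
    ∀ l, pvCheckTagsA c nxt l = l.all (fun p =>
      if p.1 = "version" ∨ p.1 = "abridged" ∨ p.1 = "dramatic reading" then true
      else (PySem.Dict.mk nxt).get? p.1 == (PySem.Dict.mk c).get? p.1) := by
  intro l
  induction l with
  | nil => rfl
  | cons p rest ih =>
    obtain ⟨tag, v⟩ := p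
    rw [pvCheckTagsA]
    by_cases hs : tag = "version" ∨ tag = "abridged" ∨ tag = "dramatic reading"
    · simp [hs, ih]
    · by_cases he : (PySem.Dict.mk nxt).get? tag = (PySem.Dict.mk c).get? tag <;>
        simp [hs, he, ih]

theorem pvCheck_eq_tagsMatch (c nxt : List (String × String)) :
    pvCheckTagsA c nxt c = pvTagsMatchB c nxt := pvCheck_eq_match c nxt c

theorem pvInnerA_spec (g : List (String × (List (String × String)) × String)) (t : String)
    (tags : List (String × String)) :
    ∀ fuel j acc, g.length - j ≤ fuel → j ≤ g.length →
      pvInnerA g t tags g.length fuel j acc =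
        (acc ++ ((g.drop j).takeWhile (fun e => e.1 == t)).filterMap
            (fun e => if pvCheckTagsA tags e.2.1 tags then some e.2.2 else none),
         if (g.drop j).dropWhile (fun e => e.1 == t) = [] then g.length - 1
         else j + ((g.drop j).takeWhile (fun e => e.1 == t)).length) := by
  intro fuel
  induction fuel with
  | zero =>
    intro j acc hk hj
    have hje : j = g.length := by omega
    subst hje
    rw [pvInnerA]
    simp
  | succ k ih =>
    intro j acc hk hj
    by_cases h : j < g.length
    · have hdrop : g.drop j = g[j] :: g.drop (j + 1) := List.drop_eq_getElem_cons h
      have hget : g.getD j ("", [], "") = g[j] := by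
        simp [List.getD_eq_getElem?_getD, List.getElem?_eq_getElem h]
      rw [pvInnerA]
      dsimp only
      rw [if_pos h, hget]
      by_cases ht : g[j].1 = t
      · have hq : (g[j].1 == t) = true := by simp [ht]
        rw [if_pos ht]
        by_cases hc : pvCheckTagsA tags g[j].2.1 tags = true
        · rw [if_pos hc, ih (j+1) _ (by omega) (by omega), hdrop]
          simp only [List.takeWhile_cons, List.dropWhile_cons, hq, if_true,
            List.filterMap_cons, hc, List.length_cons]
          refine Prod.ext (by simp) ?_
          dsimp only
          split_ifs <;> omega
        · rw [if_neg hc, ih (j+1) _ (by omega) (by omega), hdrop]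
          simp only [List.takeWhile_cons, List.dropWhile_cons, hq, if_true,
            List.filterMap_cons, hc, Bool.false_eq_true, if_false, List.length_cons]
          refine Prod.ext (by simp) ?_
          dsimp only
          split_ifs <;> omega
      · have hq : (g[j].1 == t) = false := by simp [ht]
        rw [if_neg ht, hdrop]
        simp only [List.takeWhile_cons, List.dropWhile_cons, hq, Bool.false_eq_true, if_false,
          List.filterMap_nil, List.append_nil, List.length_nil, Nat.add_zero, reduceCtorEq]
    · have hje : j = g.length := by omega
      subst hje
      rw [pvInnerA]
      dsimp only
      rw [if_neg h]
      simp

theorem pvBlocksGo_spec :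
    ∀ (l : List (String × (List (String × String)) × String)) (a : String × (List (String × String)) × String)
      (tail : List (String × (List (String × String)) × String)) (out : List (List (String × (List (String × String)) × String))),
      pvBlocksGo out (a :: tail) l =
        out ++ (a :: (tail ++ l.takeWhile (fun x => x.1 == a.1))) ::
          pvBlocks (l.dropWhile (fun x => x.1 == a.1)) := by
  intro l
  induction l with
  | nil => intro a tail out; simp [pvBlocksGo, pvBlocks]
  | cons e rest ih =>
    intro a tail out
    by_cases he : e.1 = a.1
    · have hcond : ¬ ((a :: tail) ≠ [] ∧ e.1 ≠ ((a :: tail).headD ("", [], "")).1) := by simp [he]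
      rw [pvBlocksGo, if_neg hcond]
      simp only [List.cons_append]
      rw [ih a (tail ++ [e]) out]
      simp [he]
    · have hcond : ((a :: tail) ≠ [] ∧ e.1 ≠ ((a :: tail).headD ("", [], "")).1) := by simp [he]
      rw [pvBlocksGo, if_pos hcond]
      rw [ih e [] (out ++ [a :: tail])]
      have hb : pvBlocks (e :: rest) = pvBlocksGo [] [e] rest := by
        rw [pvBlocks, pvBlocksGo]
        simp
      rw [ih e [] []] at hb
      have hq : (e.1 == a.1) = false := by simp [he]
      simp [hq, hb]

theorem pvBlocks_cons (e : String × (List (String × String)) × String)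
    (l : List (String × (List (String × String)) × String)) :
    pvBlocks (e :: l) =
      (e :: l.takeWhile (fun x => x.1 == e.1)) :: pvBlocks (l.dropWhile (fun x => x.1 == e.1)) := by
  rw [pvBlocks, pvBlocksGo]
  simp only [ne_eq, not_true_eq_false, false_and, if_false, List.nil_append]
  rw [pvBlocksGo_spec]
  simp

theorem pvBlocks_nil : pvBlocks [] = [] := by rw [pvBlocks, pvBlocksGo]; simp

theorem pvStepB_cons (output : List (List String)) (c : String × (List (String × String)) × String)
    (rest : List (String × (List (String × String)) × String)) :
    pvStepB output (c :: rest) =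
      (if (rest.filterMap (fun e => if pvTagsMatchB c.2.1 e.2.1 then some e.2.2 else none)) ≠ [] then
        output ++ [(rest.filterMap (fun e => if pvTagsMatchB c.2.1 e.2.1 then some e.2.2 else none)) ++ [c.2.2]]
      else output) := by
  cases rest with
  | nil => simp [pvStepB]
  | cons f fs => rw [pvStepB, if_neg (by simp)]

theorem pvLoopA_spec (g : List (String × (List (String × String)) × String)) :
    ∀ fuel i output, g.length - i ≤ fuel → i ≤ g.length →
      pvLoopA g g.length fuel i output = (pvBlocks (g.drop i)).foldl pvStepB output := by
  intro fuel
  induction fuel with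
  | zero =>
    intro i output hk hi
    have hie : i = g.length := by omega
    subst hie
    rw [pvLoopA]
    simp [pvBlocks_nil]
  | succ k ih =>
    intro i output hk hi
    by_cases h : i < g.length - 1
    · have hlt : i < g.length := by omega
      have hget : g.getD i ("", [], "") = g[i] := by
        simp [List.getD_eq_getElem?_getD, List.getElem?_eq_getElem hlt]
      have hdrop : g.drop i = g[i] :: g.drop (i + 1) := List.drop_eq_getElem_cons hlt
      rw [pvLoopA]
      dsimp only
      rw [if_pos h, hget]
      rw [pvInnerA_spec g g[i].1 g[i].2.1 (g.length - (i+1)) (i+1) [] (by omega) (by omega)]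
      dsimp only
      rw [hdrop, pvBlocks_cons, List.foldl_cons, pvStepB_cons]
      have hfm : (List.takeWhile (fun x => x.1 == g[i].1) (g.drop (i+1))).filterMap
            (fun e => if pvCheckTagsA g[i].2.1 e.2.1 g[i].2.1 = true then some e.2.2 else none)
          = (List.takeWhile (fun x => x.1 == g[i].1) (g.drop (i+1))).filterMap
            (fun e => if pvTagsMatchB g[i].2.1 e.2.1 then some e.2.2 else none) := by
        apply List.filterMap_congr
        intro e _
        rw [pvCheck_eq_tagsMatch]
      rw [List.nil_append, hfm]
      set run := List.takeWhile (fun x => x.1 == g[i].1) (g.drop (i+1)) with hrun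
      set rem := List.dropWhile (fun x => x.1 == g[i].1) (g.drop (i+1)) with hremdef
      set fm := run.filterMap (fun e => if pvTagsMatchB g[i].2.1 e.2.1 then some e.2.2 else none) with hfmdef
      have hsplit : g.drop (i+1) = run ++ rem := (List.takeWhile_append_dropWhile).symm
      have hcg : (if fm.length > 0 then output ++ [fm ++ [g[i].2.2]] else output)
          = (if fm ≠ [] then output ++ [fm ++ [g[i].2.2]] else output) := by
        by_cases hm : fm = [] <;> simp [hm]
      by_cases hrem : rem = []
      · rw [if_pos hrem]
        have hcase : ∀ o : List (List String), pvLoopA g g.length k (g.length - 1) o = o := by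
          intro o
          cases k with
          | zero => rw [pvLoopA]
          | succ k => rw [pvLoopA]; dsimp only; rw [if_neg (by omega)]
        rw [hcase]
        rw [hrem, pvBlocks_nil, List.foldl_nil]
        exact hcg
      · rw [if_neg hrem]
        have hlen : run.length ≤ g.length - (i+1) := by
          have h1 := congrArg List.length hsplit
          simp [List.length_drop] at h1
          omega
        have hdrop2 : g.drop (i + 1 + run.length) = rem := by
          have h2 : g.drop (i + 1 + run.length) = (g.drop (i+1)).drop run.length := by
            rw [List.drop_drop]
          rw [h2, hsplit, List.drop_left]
        have hrec := ih (i + 1 + run.length)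
          (if fm ≠ [] then output ++ [fm ++ [g[i].2.2]] else output) (by omega) (by omega)
        rw [hdrop2] at hrec
        rw [hcg]
        exact hrec
    · rcases Nat.lt_or_ge i g.length with hlt | hge
      · have hie : i = g.length - 1 := by omega
        have hdrop : g.drop i = g[i] :: g.drop (i + 1) := List.drop_eq_getElem_cons hlt
        have hnil : g.drop (i + 1) = [] := by
          apply List.drop_eq_nil_of_le
          omega
        rw [pvLoopA]
        dsimp only
        rw [if_neg h, hdrop, hnil, pvBlocks_cons]
        simp [pvBlocks_nil, pvStepB]
      · have hnil : g.drop i = [] := List.drop_eq_nil_of_le hge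
        rw [pvLoopA]
        dsimp only
        rw [if_neg h, hnil, pvBlocks_nil]
        simp

-- ---- B side: the dict built over a sorted group lists exactly the consecutive blocks ----

theorem pvFoldAdd_of_mem (xs : List String) :
    ∀ acc : List String, (∀ x ∈ xs, x ∈ acc) → xs.foldl PySem.Set.add acc = acc := by
  induction xs with
  | nil => intro acc _; rfl
  | cons x rest ih =>
    intro acc h
    have hx : x ∈ acc := h x (by simp)
    have hadd : PySem.Set.add acc x = acc := by
      simp [PySem.Set.add, PySem.Set.contains, hx]
    rw [List.foldl_cons, hadd]
    exact ih acc (fun y hy => h y (by simp [hy]))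

theorem pvFoldAdd_disjoint (xs : List String) :
    ∀ s t : List String, (∀ x ∈ xs, x ∉ s) →
      xs.foldl PySem.Set.add (s ++ t) = s ++ xs.foldl PySem.Set.add t := by
  induction xs with
  | nil => intro s t _; rfl
  | cons x rest ih =>
    intro s t h
    have hx : x ∉ s := h x (by simp)
    have hadd : PySem.Set.add (s ++ t) x = s ++ PySem.Set.add t x := by
      by_cases hm : x ∈ t
      · simp [PySem.Set.add, PySem.Set.contains, hm, hx]
      · simp [PySem.Set.add, PySem.Set.contains, hm, hx]
    rw [List.foldl_cons, hadd, List.foldl_cons]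
    exact ih s (PySem.Set.add t x) (fun y hy => h y (by simp [hy]))

-- the heart: over a title-sorted list, first-occurrence titles + per-title filters = consecutive blocks
theorem pvDictBlocks : ∀ (n : Nat) (g : List (String × (List (String × String)) × String)),
    g.length ≤ n → g.Pairwise (fun a b => a.1.toList ≤ b.1.toList) →
    (PySem.Set.ofList (g.map (·.1))).map
        (fun t => (g.filter (fun e => e.1 == t)).map (·.2))
      = (pvBlocks g).map (fun b => b.map (·.2)) := by
  intro n
  induction n with
  | zero =>
    intro g hn _
    have : g = [] := List.eq_nil_of_length_eq_zero (by omega)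
    subst this
    simp [pvBlocks_nil, PySem.Set.ofList]
  | succ m ih =>
    intro g hn hp
    cases g with
    | nil => simp [pvBlocks_nil, PySem.Set.ofList]
    | cons e l =>
      set run := l.takeWhile (fun x => x.1 == e.1) with hrundef
      set rem := l.dropWhile (fun x => x.1 == e.1) with hremdef
      have hsplit : l = run ++ rem := (List.takeWhile_append_dropWhile).symm
      have hrun_eq : ∀ x ∈ run, x.1 = e.1 := by
        intro x hx
        have := List.mem_takeWhile_imp hx
        simpa using this
      have hple : ∀ x ∈ l, e.1.toList ≤ x.1.toList := by
        intro x hx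
        exact (List.pairwise_cons.mp hp).1 x hx
      have hpl : l.Pairwise (fun a b => a.1.toList ≤ b.1.toList) :=
        (List.pairwise_cons.mp hp).2
      have hrem_gt : ∀ x ∈ rem, e.1.toList < x.1.toList := by
        cases hr : rem with
        | nil => intro x hx; simp at hx
        | cons f rest =>
          have hdw : l.dropWhile (fun x => x.1 == e.1) = f :: rest := by rw [← hremdef, hr]
          have hf_ne : (f.1 == e.1) = false := by
            have h2 := List.head_dropWhile_not (fun x => x.1 == e.1) (l := l) (by rw [hdw]; simp)
            rwa [show (l.dropWhile (fun x => x.1 == e.1)).head (by rw [hdw]; simp) = f from by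
              simp [hdw]] at h2
          have hf_ne' : f.1 ≠ e.1 := by simpa using hf_ne
          have hf_mem : f ∈ l := by
            rw [hsplit, hr]; simp
          have hf_le : e.1.toList ≤ f.1.toList := hple f hf_mem
          have hf_lt : e.1.toList < f.1.toList := by
            rcases lt_or_eq_of_le hf_le with h | h
            · exact h
            · exfalso
              apply hf_ne'
              apply String.ext
              exact h.symm
          intro x hx
          rcases List.mem_cons.mp hx with h | h
          · subst h; exact hf_lt
          · -- f before x in l: use pairwise on l restricted to rem
            have hrem_pw : rem.Pairwise (fun a b => a.1.toList ≤ b.1.toList) :=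
              hpl.sublist (hremdef ▸ List.dropWhile_sublist _)
            rw [hr] at hrem_pw
            have := (List.pairwise_cons.mp hrem_pw).1 x h
            exact lt_of_lt_of_le hf_lt this
      have hrem_ne : ∀ x ∈ rem, x.1 ≠ e.1 := by
        intro x hx heq
        have := hrem_gt x hx
        rw [heq] at this
        exact lt_irrefl _ this
      -- titles
      have htitles : PySem.Set.ofList ((e :: l).map (·.1))
          = e.1 :: PySem.Set.ofList (rem.map (·.1)) := by
        have h0 : PySem.Set.ofList ((e :: l).map (·.1))
            = (run.map (·.1) ++ rem.map (·.1)).foldl PySem.Set.add [e.1] := by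
          rw [PySem.Set.ofList_eq_foldl]
          rw [hsplit]
          simp only [List.map_cons, List.map_append, List.foldl_cons, List.foldl_append]
          rfl
        rw [h0, List.foldl_append]
        have hrunfold : (run.map (·.1)).foldl PySem.Set.add [e.1] = [e.1] := by
          apply pvFoldAdd_of_mem
          intro x hx
          rcases List.mem_map.mp hx with ⟨y, hy, he⟩
          simp [← he, hrun_eq y hy]
        rw [hrunfold]
        have := pvFoldAdd_disjoint (rem.map (·.1)) [e.1] [] (by
          intro x hx
          rcases List.mem_map.mp hx with ⟨y, hy, he⟩
          simp [← he]
          exact hrem_ne y hy)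
        simpa [PySem.Set.ofList_eq_foldl] using this
      -- filters
      have hfilt_head : (e :: l).filter (fun x => x.1 == e.1) = e :: run := by
        rw [hsplit]
        simp only [List.filter_cons, List.filter_append]
        have h1 : (e.1 == e.1) = true := by simp
        rw [if_pos h1]
        congr 1
        have h2 : run.filter (fun x => x.1 == e.1) = run :=
          List.filter_eq_self.mpr (fun x hx => by simp [hrun_eq x hx])
        have h3 : rem.filter (fun x => x.1 == e.1) = [] :=
          List.filter_eq_nil_iff.mpr (fun x hx => by simp [hrem_ne x hx])
        rw [h2, h3, List.append_nil]
      have hfilt_rest : ∀ t ∈ PySem.Set.ofList (rem.map (·.1)),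
          (e :: l).filter (fun x => x.1 == t) = rem.filter (fun x => x.1 == t) := by
        intro t ht
        have htm : t ∈ rem.map (·.1) := (PySem.Set.mem_ofList _ t).mp ht
        rcases List.mem_map.mp htm with ⟨y, hy, hyt⟩
        have hne : t ≠ e.1 := by
          intro h
          exact hrem_ne y hy (hyt.trans h)
        rw [hsplit]
        simp only [List.filter_cons, List.filter_append]
        rw [if_neg (by simp; exact fun h => hne h.symm)]
        have h2 : run.filter (fun x => x.1 == t) = [] := by
          apply List.filter_eq_nil_iff.mpr
          intro x hx
          have hxe := hrun_eq x hx
          simp [hxe]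
          exact fun h => hne h.symm
        rw [h2, List.nil_append]
      -- recurse
      have hrem_pw : rem.Pairwise (fun a b => a.1.toList ≤ b.1.toList) :=
        hpl.sublist (hremdef ▸ List.dropWhile_sublist _)
      have hrem_len : rem.length ≤ m := by
        have := List.length_dropWhile_le (fun x => x.1 == e.1) l
        rw [← hremdef] at this
        simp at hn
        omega
      have hih := ih rem hrem_len hrem_pw
      rw [htitles, pvBlocks_cons, List.map_cons, List.map_cons]
      congr 1
      · rw [hfilt_head]
      · rw [← hih]
        apply List.map_congr_left
        intro t ht
        rw [hfilt_rest t ht]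

-- B's step on (tags, name) pairs agrees with the proof-side step on full triples
theorem pvStepB'_map (output : List (List String)) (b : List (String × (List (String × String)) × String)) :
    pvStepB' output (b.map (·.2)) = pvStepB output b := by
  cases b with
  | nil => rfl
  | cons c rest =>
    simp only [List.map_cons]
    rw [pvStepB', pvStepB]
    simp only [List.length_cons, List.length_map, List.filterMap_map]
    rfl

-- one group of B: the dict's values folded = the blocks folded
theorem pvGroupB_eq (g : List (String × (List (String × String)) × String))
    (hp : g.Pairwise (fun a b => a.1.toList ≤ b.1.toList)) (output : List (List String)) :
    (g.foldl (fun d e => PySem.Dict.modify d e.1 [] (· ++ [(e.2.1, e.2.2)])) PySem.Dict.empty).values.foldl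
        pvStepB' output
      = (pvBlocks g).foldl pvStepB output := by
  set d := g.foldl (fun d e => PySem.Dict.modify d e.1 [] (· ++ [(e.2.1, e.2.2)])) PySem.Dict.empty with hd
  have hnodup : d.keys.Nodup := by
    rw [hd]
    exact PySem.Dict.nodup_keys_foldl_modify_key g (·.1) [] (fun _ e => (· ++ [(e.2.1, e.2.2)]))
      PySem.Dict.empty (by decide)
  have hkeys : d.keys = PySem.Set.ofList (g.map (·.1)) := by
    rw [hd]
    have := PySem.Dict.keys_foldl_modify_key g (·.1) [] (fun _ e => (· ++ [(e.2.1, e.2.2)]))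
      PySem.Dict.empty
    simpa [PySem.Set.ofList_eq_foldl, PySem.Set.update, PySem.Dict.keys_empty] using this
  have hget : ∀ t, d.getD t [] = (g.filter (fun e => e.1 == t)).map (·.2) := by
    intro t
    rw [hd]
    have := PySem.Dict.getD_foldl_modify_append (l := g.map (fun e => (e.1, e.2)))
      (d := PySem.Dict.empty) (c := t)
    simp only [List.foldl_map] at this
    simpa [List.filter_map, List.map_map, Function.comp] using this
  have hvals : d.values = d.keys.map (fun k => d.getD k []) :=
    PySem.Dict.values_eq_map_keys d hnodup []
  rw [hvals, hkeys]
  have hmap : (PySem.Set.ofList (g.map (·.1))).map (fun k => d.getD k [])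
      = (pvBlocks g).map (fun b => b.map (·.2)) := by
    rw [← pvDictBlocks g.length g le_rfl hp]
    apply List.map_congr_left
    intro t _
    exact hget t
  rw [hmap, List.foldl_map]
  have hfn : (fun (acc : List (List String)) b => pvStepB' acc (b.map (·.2))) = pvStepB := by
    funext acc b
    exact pvStepB'_map acc b
  rw [hfn]

-- ===== VERDICT (by name: the statement is the Claim_ definition above) =====
theorem getPossibleMatches_spec : Claim_equal_getPossibleMatches := by
  intro allGroups _
  unfold Spec_getPossibleMatches
  rw [getPossibleMatches, getPossibleMatches_alt]
  have hfun : (fun (output : List (List String)) (group : List (String × (List (String × String)) × String)) =>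
        let g := PySem.List.sorted group (fun x => x.1.toList) false
        pvLoopA g g.length g.length 0 output)
      = (fun (output : List (List String)) (group : List (String × (List (String × String)) × String)) =>
        let g := PySem.List.sorted group (fun x => x.1.toList) false
        let byTitle := g.foldl
          (fun d e => PySem.Dict.modify d e.1 [] (· ++ [(e.2.1, e.2.2)])) PySem.Dict.empty
        byTitle.values.foldl pvStepB' output) := by
    funext output group
    dsimp only
    rw [pvLoopA_spec _ (PySem.List.sorted group (fun x => x.1.toList) false).length 0 output (by omega) (by omega), List.drop_zero]
    have hp : (PySem.List.sorted group (fun x => x.1.toList) false).Pairwise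
        (fun a b => a.1.toList ≤ b.1.toList) := by
      have h := PySem.List.sorted_pairwise (κ := List Char) group (fun x => x.1.toList)
      convert h using 2
    exact (pvGroupB_eq _ hp output).symm
  rw [hfun]
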